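-- pv_equiv track=rewrite | github.com/XuanYang-cn/gitparse | util.py | get_string_width
-- ===== SOURCE A (Python) =====
-- def get_string_width(multi_string):
--     lines = multi_string.split("\n")
--     max_width = 0
--     for l in lines:
--         len_l = len(l)
--
--         if max_width < len_l:
--             max_width = len_l
--
--     return max_width
-- ===== SOURCE B (Python) =====
-- def get_string_width(multi_string):
--     current = 0
--     max_width = 0
--     for ch in multi_string:
--         if ch == '\n':
--             max_width = max(max_width, current)
--             current = 0
--         else:
--             current += 1
--     return max(max_width, current)
-- ===== Notes on version B (the rewrite author's own statement) =====
-- stated objective: alternative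
-- what changed: Single character-level scan with a current-line counter and running max, instead of materialising the list of lines via split and folding over it.
import Mathlib
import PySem

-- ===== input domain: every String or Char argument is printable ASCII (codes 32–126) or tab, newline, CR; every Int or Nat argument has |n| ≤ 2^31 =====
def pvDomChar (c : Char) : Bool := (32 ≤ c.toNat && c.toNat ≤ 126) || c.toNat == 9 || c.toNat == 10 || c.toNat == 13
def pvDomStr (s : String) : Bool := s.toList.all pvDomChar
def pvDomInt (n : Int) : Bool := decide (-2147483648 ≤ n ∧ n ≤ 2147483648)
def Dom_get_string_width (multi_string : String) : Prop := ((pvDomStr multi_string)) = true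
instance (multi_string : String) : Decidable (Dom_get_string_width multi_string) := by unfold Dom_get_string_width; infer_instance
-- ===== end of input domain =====

-- B replaces split-into-lines + fold over lines by a single character scan with a
-- current-line counter and a running maximum (alternative decomposition, same cost).


-- ===== PORT A =====
-- multi_string.split("\n"): the separator is the nonempty literal "\n", so
-- PySem.Str.split? always returns some; .getD [] is exact here.
def get_string_width (multi_string : String) : Int :=
  let lines := (PySem.Str.split? multi_string "\n").getD []
  lines.foldl (fun max_width l =>
    let len_l := PySem.Str.len l
    if max_width < len_l then len_l else max_width) 0

-- ===== PORT B =====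
def get_string_width_alt (multi_string : String) : Int :=
  let st := multi_string.toList.foldl (fun (st : Int × Int) ch =>
    if ch = '\n' then (0, max st.2 st.1) else (st.1 + 1, st.2)) (0, 0)
  max st.2 st.1

-- ===== PRECONDITION & SPEC =====
def Spec_get_string_width (multi_string : String) (out : Int) : Prop := out = get_string_width_alt multi_string
instance (multi_string : String) (out : Int) : Decidable (Spec_get_string_width multi_string out) := by unfold Spec_get_string_width; infer_instance

-- ===== CLAIM (what is proved, stated in full; the proofs are below) =====
def Claim_equal_get_string_width : Prop := ∀ (multi_string : String), Dom_get_string_width multi_string → Spec_get_string_width multi_string (get_string_width multi_string)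

-- ===== LEMMAS AND PROOFS =====
set_option maxRecDepth 4000

-- The list of '\n'-separated pieces of a character list (always nonempty).
def pvPieces : List Char → List (List Char)
  | [] => [[]]
  | c :: rest =>
    if c = '\n' then [] :: pvPieces rest
    else match pvPieces rest with
      | [] => [[c]]
      | p :: ps => (c :: p) :: ps

def pvPrepend (pre : List Char) : List (List Char) → List (List Char)
  | [] => [pre]
  | p :: ps => (pre ++ p) :: ps

lemma pvPieces_ne_nil (l : List Char) : pvPieces l ≠ [] := by
  cases l with
  | nil => simp [pvPieces]
  | cons c rest =>
    simp only [pvPieces]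
    split
    · simp
    · split <;> simp

lemma pvPrepend_nil (ps : List (List Char)) (h : ps ≠ []) : pvPrepend [] ps = ps := by
  cases ps with
  | nil => exact absurd rfl h
  | cons p qs => simp [pvPrepend]

lemma pvPrepend_prepend (a b : List Char) (ps : List (List Char)) :
    pvPrepend a (pvPrepend b ps) = pvPrepend (a ++ b) ps := by
  cases ps <;> simp [pvPrepend]

lemma pvPieces_cons_ne (c : Char) (rest : List Char) (h : ¬ c = '\n') :
    pvPieces (c :: rest) = pvPrepend [c] (pvPieces rest) := by
  simp only [pvPieces, if_neg h]
  cases hp : pvPieces rest <;> simp [pvPrepend]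

lemma pvGo_eq (fuel : Nat) (l cur : List Char) (acc : List (List Char))
    (h : l.length < fuel) :
    PySem.Chars.splitOn.go ['\n'] fuel l cur acc
      = acc.reverse ++ pvPrepend cur.reverse (pvPieces l) := by
  induction l generalizing fuel cur acc with
  | nil =>
    cases fuel with
    | zero => omega
    | succ f => simp [PySem.Chars.splitOn.go, pvPieces, pvPrepend]
  | cons c rest ih =>
    cases fuel with
    | zero => omega
    | succ f =>
      by_cases hc : c = '\n'
      · subst hc
        have : (['\n'] : List Char).isPrefixOf ('\n' :: rest) = true := by
          simp [List.isPrefixOf]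
        rw [PySem.Chars.splitOn.go]
        simp only [this, if_true, List.length_singleton, List.drop_succ_cons,
          List.drop_zero]
        rw [ih f [] (cur.reverse :: acc) (by simp at h; omega)]
        simp only [List.reverse_nil]
        rw [pvPrepend_nil _ (pvPieces_ne_nil rest)]
        rw [show pvPieces ('\n' :: rest) = [] :: pvPieces rest from rfl]
        rw [show pvPrepend cur.reverse ([] :: pvPieces rest)
            = (cur.reverse ++ []) :: pvPieces rest from rfl]
        simp
      · have hpre : (['\n'] : List Char).isPrefixOf (c :: rest) = false := by
          simp only [List.isPrefixOf, Bool.and_eq_false_iff, beq_eq_false_iff_ne, ne_eq]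
          exact Or.inl fun h' => hc h'.symm
        rw [PySem.Chars.splitOn.go]
        simp only [hpre, Bool.false_eq_true, if_false]
        rw [ih f (c :: cur) acc (by simp at h; omega)]
        rw [pvPieces_cons_ne c rest hc]
        simp [pvPrepend_prepend]

lemma pvSplitOn_eq (l : List Char) :
    PySem.Chars.splitOn l ['\n'] = pvPieces l := by
  unfold PySem.Chars.splitOn
  rw [pvGo_eq _ _ _ _ (by omega)]
  simp [pvPrepend_nil _ (pvPieces_ne_nil l)]

def pvAddFirst (k : Int) : List Int → List Int
  | [] => [k]
  | x :: xs => (k + x) :: xs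

def pvG (mw x : Int) : Int := if mw < x then x else mw

lemma pvG_max (mw k : Int) : pvG mw k = max mw k := by
  simp only [pvG, max_def]; split_ifs <;> omega

-- B's scan from state (k, mw) equals A's max-fold over the pieces, with the
-- first piece's length increased by k.
lemma pvScan_eq (l : List Char) (k mw : Int) :
    (let st := l.foldl (fun (st : Int × Int) ch =>
        if ch = '\n' then (0, max st.2 st.1) else (st.1 + 1, st.2)) (k, mw)
     max st.2 st.1)
      = (pvAddFirst k ((pvPieces l).map (fun p => (p.length : Int)))).foldl pvG mw := by
  induction l generalizing k mw with
  | nil => simp [pvPieces, pvAddFirst, pvG_max]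
  | cons c rest ih =>
    by_cases hc : c = '\n'
    · subst hc
      simp only [List.foldl_cons, if_true]
      rw [ih 0 (max mw k)]
      cases hp : pvPieces rest with
      | nil => exact absurd hp (pvPieces_ne_nil rest)
      | cons p ps =>
        simp [pvPieces, hp, pvAddFirst, pvG_max]
    · simp only [List.foldl_cons, if_neg hc]
      rw [ih (k + 1) mw, pvPieces_cons_ne c rest hc]
      cases hp : pvPieces rest with
      | nil => exact absurd hp (pvPieces_ne_nil rest)
      | cons p ps =>
        simp only [pvPrepend, List.map_cons, pvAddFirst]
        congr 2
        simp only [List.length_append, List.length_cons, List.length_nil]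
        push_cast
        ring

-- ===== VERDICT (by name: the statement is the Claim_ definition above) =====
theorem get_string_width_spec : Claim_equal_get_string_width := by
  intro s _
  unfold Spec_get_string_width get_string_width get_string_width_alt
  have hsplit : PySem.Str.split? s "\n"
      = some ((PySem.Chars.splitOn s.toList ['\n']).map String.ofList) := by
    rfl
  rw [hsplit]
  simp only [Option.getD_some, pvSplitOn_eq]
  rw [pvScan_eq s.toList 0 0]
  cases hp : pvPieces s.toList with
  | nil => exact absurd hp (pvPieces_ne_nil s.toList)
  | cons p ps =>
    simp [pvAddFirst, List.foldl_map, PySem.Str.len, pvG]
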